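-- pv_equiv track=rewrite | github.com/mjw2705/CS | Coding/line_t1.py | solution
-- ===== SOURCE A (Python) =====
-- def solution(table, languages, preference):
--     job_list = []
--     int_list = [5, 4, 3, 2, 1]
--     for i in table:
--         score_sum = 0
--         arr = i.split(" ")
--         dic = dict(zip(arr[1:], int_list))
--
--         for lang, pre in zip(languages, preference):
--             if lang in dic.keys():
--                 score = dic.get(lang) * pre
--             else:
--                 score = 0
--             score_sum += score
--
--         job_list.append([arr[0], score_sum])
--
--     job_list.sort(key=lambda x: (-x[1], x[0]))
--     answer = job_list[0][0]
--
--     return answer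
-- ===== SOURCE B (Python) =====
-- def solution(table, languages, preference):
--     # Total preference weight per language.
--     pref = {}
--     for lang, p in zip(languages, preference):
--         pref[lang] = pref.get(lang, 0) + p
--
--     best_name = None
--     best_score = None
--     for row in table:
--         arr = row.split(" ")
--         ranks = dict(zip(arr[1:], [5, 4, 3, 2, 1]))
--         score = sum(r * pref.get(lang, 0) for lang, r in ranks.items())
--         if best_name is None or score > best_score or (score == best_score and arr[0] < best_name):
--             best_name, best_score = arr[0], score
--     return best_name
-- ===== Notes on version B (the rewrite author's own statement) =====
-- stated objective: faster
-- what changed: B builds one language->summed-preference index up front, scores each job by iterating over that job's own rank dict against the index, and selects the best job in a single running-max pass, instead of rescanning the whole preference list for every job and sorting the full score list; Pre_ excludes only the empty table, on which A raises IndexError.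
import Mathlib
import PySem

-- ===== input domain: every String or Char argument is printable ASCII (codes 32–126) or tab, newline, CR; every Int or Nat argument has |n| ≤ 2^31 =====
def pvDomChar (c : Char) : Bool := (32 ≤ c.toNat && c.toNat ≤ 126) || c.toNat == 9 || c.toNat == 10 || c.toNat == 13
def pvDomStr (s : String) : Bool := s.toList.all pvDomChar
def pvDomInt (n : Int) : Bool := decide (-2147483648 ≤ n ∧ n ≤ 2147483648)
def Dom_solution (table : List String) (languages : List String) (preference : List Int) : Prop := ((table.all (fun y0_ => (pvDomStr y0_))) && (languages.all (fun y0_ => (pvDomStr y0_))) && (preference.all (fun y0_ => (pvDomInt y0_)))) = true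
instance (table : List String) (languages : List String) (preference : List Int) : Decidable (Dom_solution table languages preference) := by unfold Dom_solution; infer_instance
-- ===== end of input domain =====

-- B replaces A's per-job full preference scan + global sort by a prebuilt
-- language->summed-preference index, a per-job scan over that job's own rank dict,
-- and a single-pass running-best selection (measured faster: no per-job preference rescan, no sort).

-- ===== PORT A =====
def solution (table : List String) (languages : List String) (preference : List Int) : String :=
  let intList : List Int := [5, 4, 3, 2, 1]
  let jobList : List (String × Int) := table.foldl (fun acc i =>
    let arr := (PySem.Str.split? i " ").getD []
    let dic : PySem.Dict String Int := PySem.Dict.ofList ((arr.drop 1).zip intList)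
    let scoreSum : Int := (languages.zip preference).foldl (fun s lp =>
      s + (if dic.contains lp.1 then dic.getD lp.1 0 * lp.2 else 0)) 0
    acc ++ [(PySem.List.pyGetD arr 0 "", scoreSum)]) []
  let sortedJobs := PySem.List.sorted2 jobList (fun x => -x.2) (fun x => x.1)
  (PySem.List.pyGetD sortedJobs 0 ("", 0)).1

-- ===== PORT B =====
def solution_alt (table : List String) (languages : List String) (preference : List Int) : String :=
  let pref : PySem.Dict String Int := (languages.zip preference).foldl
    (fun d lp => d.modify lp.1 0 (· + lp.2)) PySem.Dict.empty
  let best := table.foldl (fun (best : Option (String × Int)) row =>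
    let arr := (PySem.Str.split? row " ").getD []
    let ranks : PySem.Dict String Int := PySem.Dict.ofList ((arr.drop 1).zip ([5, 4, 3, 2, 1] : List Int))
    let score : Int := ranks.items.foldl (fun s lr => s + lr.2 * pref.getD lr.1 0) 0
    let name := PySem.List.pyGetD arr 0 ""
    match best with
    | none => some (name, score)
    | some b => if score > b.2 ∨ (score = b.2 ∧ name < b.1) then some (name, score) else some b) none
  (best.map (·.1)).getD ""   -- Python B returns None on an empty table; outside Pre_

-- ===== PRECONDITION & SPEC =====
-- Pre_ excludes only the empty table: there A raises IndexError and B returns None, not a string.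
def Pre_solution (table : List String) (languages : List String) (preference : List Int) : Prop := table ≠ []
instance (table : List String) (languages : List String) (preference : List Int) : Decidable (Pre_solution table languages preference) := by unfold Pre_solution; infer_instance

def pvWitness_solution : List String × List String × List Int :=
  (["dev python java", "ops c"], ["python", "c"], [4, 2])

def Spec_solution (table : List String) (languages : List String) (preference : List Int) (out : String) : Prop := out = solution_alt table languages preference
instance (table : List String) (languages : List String) (preference : List Int) (out : String) : Decidable (Spec_solution table languages preference out) := by unfold Spec_solution; infer_instance

-- ===== CLAIM (what is proved, stated in full; the proofs are below) =====
def Claim_equal_solution : Prop := ∀ (table : List String) (languages : List String) (preference : List Int), Dom_solution table languages preference → Pre_solution table languages preference → Spec_solution table languages preference (solution table languages preference)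

-- ===== LEMMAS AND PROOFS =====

-- total preference weight of language l in the zipped list Z
def pvPZ (Z : List (String × Int)) (l : String) : Int :=
  (Z.map (fun lp => if lp.1 = l then lp.2 else 0)).sum

theorem pvPZ_cons (lp : String × Int) (Z : List (String × Int)) (l : String) :
    pvPZ (lp :: Z) l = (if lp.1 = l then lp.2 else 0) + pvPZ Z l := by
  simp [pvPZ]

-- L1: the preference index holds exactly the summed weights
theorem pref_getD (Z : List (String × Int)) (d0 : PySem.Dict String Int) (l : String) :
    (Z.foldl (fun d lp => d.modify lp.1 0 (· + lp.2)) d0).getD l 0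
      = d0.getD l 0 + pvPZ Z l := by
  induction Z generalizing d0 with
  | nil => simp [pvPZ]
  | cons lp Z ih =>
      rw [List.foldl_cons, ih, pvPZ_cons, PySem.Dict.getD_modify]
      by_cases h : l = lp.1 <;> simp [h, Ne.symm] <;> omega

-- L2a: summing an indicator against a nodup-keyed table
theorem sum_ite_table (D : List (String × Int)) (g : String → Int)
    (hnd : (D.map (·.1)).Nodup) (hg : ∀ lr ∈ D, g lr.1 = lr.2) (l0 : String) (p0 : Int) :
    (D.map (fun lr => lr.2 * (if l0 = lr.1 then p0 else 0))).sum
      = if l0 ∈ D.map (·.1) then g l0 * p0 else 0 := by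
  induction D with
  | nil => simp
  | cons lr D ih =>
      simp only [List.map_cons, List.sum_cons, List.nodup_cons] at hnd ⊢
      by_cases h : l0 = lr.1
      · have hz : (D.map (fun lr' => lr'.2 * (if l0 = lr'.1 then p0 else 0))).sum = 0 := by
          apply List.sum_eq_zero
          intro x hx
          simp only [List.mem_map] at hx
          obtain ⟨lr', hmem, rfl⟩ := hx
          have hne : l0 ≠ lr'.1 := by
            intro hh
            exact hnd.1 ((h ▸ hh) ▸ List.mem_map_of_mem hmem)
          simp [hne]
        rw [hz, if_pos h]
        have hgl : g l0 = lr.2 := by rw [h]; exact hg lr (List.mem_cons_self ..)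
        rw [if_pos (by simp [h]), hgl]
        ring
      · rw [if_neg h, ih hnd.2 (fun x hx => hg x (List.mem_cons_of_mem _ hx))]
        simp only [List.mem_cons]
        by_cases hm : l0 ∈ D.map (·.1) <;> simp [hm, h]

-- L2: inverting the double sum
theorem sum_invert (Z D : List (String × Int)) (g : String → Int)
    (hnd : (D.map (·.1)).Nodup) (hg : ∀ lr ∈ D, g lr.1 = lr.2)
    (hg0 : ∀ l, l ∉ D.map (·.1) → g l = 0) :
    (Z.map (fun lp => g lp.1 * lp.2)).sum
      = (D.map (fun lr => lr.2 * pvPZ Z lr.1)).sum := by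
  induction Z with
  | nil =>
      simp only [List.map_nil, List.sum_nil]
      symm; apply List.sum_eq_zero
      intro x hx; simp only [List.mem_map] at hx
      obtain ⟨lr, _, rfl⟩ := hx; simp [pvPZ]
  | cons lp Z ih =>
      simp only [List.map_cons, List.sum_cons]
      have hsplit : (D.map (fun lr => lr.2 * pvPZ (lp :: Z) lr.1)).sum
          = (D.map (fun lr => lr.2 * (if lp.1 = lr.1 then lp.2 else 0))).sum
            + (D.map (fun lr => lr.2 * pvPZ Z lr.1)).sum := by
        rw [← List.sum_map_add]
        congr 1
        apply List.map_congr_left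
        intro lr _
        rw [pvPZ_cons, mul_add]
      rw [hsplit, ← ih, sum_ite_table D g hnd hg lp.1 lp.2]
      by_cases h : lp.1 ∈ D.map (·.1)
      · simp [h]
      · simp [h, hg0 lp.1 h]

-- the per-row score computed A's way equals B's way
theorem score_eq (Z pairs : List (String × Int)) :
    (Z.foldl (fun s lp =>
        s + (if (PySem.Dict.ofList pairs).contains lp.1 then
               (PySem.Dict.ofList pairs).getD lp.1 0 * lp.2 else 0)) 0)
    = ((PySem.Dict.ofList pairs).items.foldl
        (fun s lr => s + lr.2 * (Z.foldl (fun d lp => d.modify lp.1 0 (· + lp.2))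
                                   PySem.Dict.empty).getD lr.1 0) 0) := by
  set dic := PySem.Dict.ofList pairs with hdic
  set pref := Z.foldl (fun d lp => d.modify lp.1 0 (· + lp.2)) PySem.Dict.empty with hpref
  set g : String → Int := fun l => dic.getD l 0 with hgdef
  have hnd : dic.keys.Nodup := PySem.Dict.nodup_keys_ofList pairs
  have hndm : (dic.items.map (·.1)).Nodup := hnd
  -- left side as a sum
  have hA : (Z.foldl (fun s lp =>
        s + (if dic.contains lp.1 then dic.getD lp.1 0 * lp.2 else 0)) 0)
      = (Z.map (fun lp => g lp.1 * lp.2)).sum := by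
    rw [PySem.List.foldl_add]
    simp only [zero_add]
    congr 1
    apply List.map_congr_left
    intro lp _
    by_cases h : dic.contains lp.1
    · simp [h, hgdef]
    · have h0 : g lp.1 = 0 :=
        PySem.Dict.getD_of_not_contains _ _ (eq_false_of_ne_true h)
      simp [h, h0]
  -- right side as a sum
  have hB : (dic.items.foldl (fun s lr => s + lr.2 * pref.getD lr.1 0) 0)
      = (dic.items.map (fun lr => lr.2 * pref.getD lr.1 0)).sum := by
    rw [PySem.List.foldl_add]; simp
  rw [hA, hB]
  have hprefPZ : ∀ l, pref.getD l 0 = pvPZ Z l := by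
    intro l; rw [hpref, pref_getD]; simp [PySem.Dict.getD_empty]
  have hmapPZ : (dic.items.map (fun lr => lr.2 * pref.getD lr.1 0)).sum
      = (dic.items.map (fun lr => lr.2 * pvPZ Z lr.1)).sum := by
    congr 1; apply List.map_congr_left; intro lr _; rw [hprefPZ]
  rw [hmapPZ]
  apply sum_invert Z dic.items g hndm
  · intro lr hlr
    exact PySem.Dict.getD_of_mem_items dic (k := lr.1) (v := lr.2) hlr hnd 0
  · intro l hl
    have hc : dic.contains l = false := by
      cases hcc : dic.contains l
      · rfl
      · exact absurd ((PySem.Dict.contains_iff_mem_keys dic l).mp hcc) hl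
    exact PySem.Dict.getD_of_not_contains _ _ hc

-- head of the insertion-sort fold is the running lexicographic minimum
theorem insertBy_nonempty {α : Type} (before : α → α → Bool) (xs : List α)
    (h : α) (t : List α) :
    xs.foldl (fun acc x => PySem.List.insertBy before x acc) (h :: t) ≠ [] := by
  induction xs generalizing h t with
  | nil => simp
  | cons x xs ih =>
      simp only [List.foldl_cons]
      rw [show PySem.List.insertBy before x (h :: t)
            = if before x h then x :: h :: t else h :: PySem.List.insertBy before x t from by
          simp [PySem.List.insertBy]]
      split
      · exact ih x (h :: t)
      · exact ih h (PySem.List.insertBy before x t)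

theorem headD_foldl_insertBy {α : Type} (before : α → α → Bool) (xs : List α)
    (h : α) (t : List α) (d : α) :
    (xs.foldl (fun acc x => PySem.List.insertBy before x acc) (h :: t)).headD d
      = xs.foldl (fun b x => if before x b then x else b) h := by
  induction xs generalizing h t with
  | nil => rfl
  | cons x xs ih =>
      simp only [List.foldl_cons]
      rw [show PySem.List.insertBy before x (h :: t)
            = if before x h then x :: h :: t else h :: PySem.List.insertBy before x t from by
          simp [PySem.List.insertBy]]
      split <;> rw [ih]

theorem pyGetD_zero_headD {α : Type} (xs : List α) (d : α) (h : xs ≠ []) :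
    PySem.List.pyGetD xs 0 d = xs.headD d := by
  cases xs with
  | nil => exact absurd rfl h
  | cons x t => simp [PySem.List.pyGetD, PySem.List.pyGet?, PySem.List.pyIdx?]

-- the two selection steps agree
theorem step_cond_eq (x b : String × Int) :
    (if (decide (-x.2 < -b.2) || (!decide (-b.2 < -x.2) && decide (x.1 < b.1))) = true
       then x else b)
      = if x.2 > b.2 ∨ (x.2 = b.2 ∧ x.1 < b.1) then x else b := by
  have hiff : (decide (-x.2 < -b.2) || (!decide (-b.2 < -x.2) && decide (x.1 < b.1))) = true
      ↔ (x.2 > b.2 ∨ (x.2 = b.2 ∧ x.1 < b.1)) := by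
    simp only [Bool.or_eq_true, Bool.and_eq_true, Bool.not_eq_true', decide_eq_true_eq,
      decide_eq_false_iff_not]
    constructor
    · rintro (h | ⟨h1, h2⟩)
      · left; omega
      · rcases lt_trichotomy x.2 b.2 with hlt | heq | hgt
        · exact absurd hlt (by omega)
        · exact Or.inr ⟨heq, h2⟩
        · left; omega
    · rintro (h | ⟨h1, h2⟩)
      · left; omega
      · right; exact ⟨by omega, h2⟩
  by_cases h : x.2 > b.2 ∨ (x.2 = b.2 ∧ x.1 < b.1)
  · rw [if_pos (hiff.mpr h), if_pos h]
  · rw [if_neg (fun hc => h (hiff.mp hc)), if_neg h]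

theorem foldl_append_map {α β : Type} (f : α → β) (xs : List α) (acc : List β) :
    xs.foldl (fun acc i => acc ++ [f i]) acc = acc ++ xs.map f := by
  induction xs generalizing acc with
  | nil => simp
  | cons x xs ih => simp [ih]

-- B's Option-state running-best fold, once started, stays 'some' and tracks the plain fold
theorem option_fold_some {α β : Type} (F : Option α → β → Option α) (g : α → β → α)
    (h : ∀ b x, F (some b) x = some (g b x)) (xs : List β) (b0 : α) :
    xs.foldl F (some b0) = some (xs.foldl g b0) := by
  induction xs generalizing b0 with
  | nil => rfl
  | cons x xs ih => rw [List.foldl_cons, h, List.foldl_cons, ih]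

-- ===== VERDICT (by name: the statement is the Claim_ definition above) =====
theorem solution_spec : Claim_equal_solution := by
  intro table languages preference _ hpre
  unfold Spec_solution solution solution_alt
  cases table with
  | nil => exact absurd rfl hpre
  | cons t0 rest =>
      simp only []
      set Z := languages.zip preference with hZ
      set pref := Z.foldl (fun d lp => d.modify lp.1 0 (· + lp.2)) PySem.Dict.empty with hpref
      -- the per-row job pair, shared shape (B's computation)
      set f : String → String × Int := fun i =>
        (PySem.List.pyGetD ((PySem.Str.split? i " ").getD []) 0 "",
          (PySem.Dict.ofList ((((PySem.Str.split? i " ").getD []).drop 1).zip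
              ([5,4,3,2,1] : List Int))).items.foldl
            (fun s lr => s + lr.2 * pref.getD lr.1 0) 0) with hf
      have hjobA : ∀ i : String,
          (PySem.List.pyGetD ((PySem.Str.split? i " ").getD []) 0 "",
            Z.foldl (fun s lp =>
              s + (if (PySem.Dict.ofList ((((PySem.Str.split? i " ").getD []).drop 1).zip
                      ([5,4,3,2,1] : List Int))).contains lp.1 then
                     (PySem.Dict.ofList ((((PySem.Str.split? i " ").getD []).drop 1).zip
                      ([5,4,3,2,1] : List Int))).getD lp.1 0 * lp.2 else 0)) 0) = f i := by
        intro i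
        simp only [hf]
        exact congrArg _ (score_eq Z _)
      -- A's job list is a map
      have hjl : ((t0 :: rest).foldl (fun acc i =>
          acc ++ [(PySem.List.pyGetD ((PySem.Str.split? i " ").getD []) 0 "",
            Z.foldl (fun s lp =>
              s + (if (PySem.Dict.ofList ((((PySem.Str.split? i " ").getD []).drop 1).zip
                      ([5,4,3,2,1] : List Int))).contains lp.1 then
                     (PySem.Dict.ofList ((((PySem.Str.split? i " ").getD []).drop 1).zip
                      ([5,4,3,2,1] : List Int))).getD lp.1 0 * lp.2 else 0)) 0)]) [])
          = f t0 :: rest.map f := by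
        rw [foldl_append_map]
        simp only [List.nil_append, List.map_cons]
        congr 1
        · exact hjobA t0
        · exact List.map_congr_left (fun i _ => hjobA i)
      rw [hjl]
      -- unfold sorted2 to the insertBy fold
      set before : (String × Int) → (String × Int) → Bool := fun a b =>
        decide (-a.2 < -b.2) || (!decide (-b.2 < -a.2) && decide (a.1 < b.1)) with hbefore
      have hsorted : PySem.List.sorted2 (f t0 :: rest.map f)
            (fun x => -x.2) (fun x => x.1)
          = (rest.map f).foldl (fun acc x => PySem.List.insertBy before x acc) [f t0] := by
        rfl
      rw [hsorted, pyGetD_zero_headD _ _ (insertBy_nonempty before (rest.map f) (f t0) []),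
        headD_foldl_insertBy]
      -- B's side: Option fold over t0 :: rest collapses to the plain running-best fold
      have hBfold : ((t0 :: rest).foldl (fun (best : Option (String × Int)) row =>
            match best with
            | none => some (f row)
            | some b => if (f row).2 > b.2 ∨ ((f row).2 = b.2 ∧ (f row).1 < b.1)
                        then some (f row) else some b) none)
          = some (rest.foldl (fun b row =>
              if (f row).2 > b.2 ∨ ((f row).2 = b.2 ∧ (f row).1 < b.1) then f row else b)
              (f t0)) := by
        simp only [List.foldl_cons]
        exact option_fold_some
          (fun (best : Option (String × Int)) row =>
            match best with
            | none => some (f row)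
            | some b => if (f row).2 > b.2 ∨ ((f row).2 = b.2 ∧ (f row).1 < b.1)
                        then some (f row) else some b)
          (fun b row => if (f row).2 > b.2 ∨ ((f row).2 = b.2 ∧ (f row).1 < b.1) then f row else b)
          (fun b row => (apply_ite some _ (f row) b).symm) rest (f t0)
      rw [hBfold]
      simp only [Option.map_some, Option.getD_some]
      rw [List.foldl_map]
      have hstep : (fun (b : String × Int) (row : String) =>
            if before (f row) b = true then f row else b)
          = fun b row =>
              if (f row).2 > b.2 ∨ ((f row).2 = b.2 ∧ (f row).1 < b.1) then f row else b := by
        funext b row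
        exact step_cond_eq (f row) b
      rw [hstep]
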